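/- GENERATED by farm/mkstatement.py from design/units.tsv (unit `swap_bytes`) and the Specs of Vorbis/Spec/*.lean — do not edit.
   THE STATEMENT of the proof unit `swap_bytes`: the function `swap_bytes` (34 instructions) satisfies its contract,
   given the contracts of its callees. What the names mean: Vorbis/Spec/Basic.lean. The theorem to prove:
   `theorem swap_bytes_ok : Vorbis.Spec.swap_bytes.Statement`. -/
import Vorbis.Spec.LibcSort
namespace Vorbis.Spec.swap_bytes
open X86 X86.User Asan

/-- The statement of unit `swap_bytes`. -/
def Statement : Prop :=
  ∀ (Lay : Layout) (_hLay : Lay.hi = 0x1000000) (μ : Microarch) (_hμ : UserX.MicroOK μ) (u₀ : State)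
    (_hcode : HasCodeNat Lay u₀ Vorbis.L.swap_bytes.entry Vorbis.Code.code_swap_bytes.nat Vorbis.L.swap_bytes.size)
    (_h_asan_load1_noabort : Asan.SmallCheck Lay μ Vorbis.WayInv (Vorbis.CodeOK u₀) [.rax, .rdx] 1 Vorbis.L.__asan_load1_noabort.entry),
    ∀ (others : List Obj) (frames : List (Nat × FrameLayout)), Calls Lay μ Vorbis.WayInv (Vorbis.conv u₀) Vorbis.L.swap_bytes.entry (Vorbis.Spec.swap_bytes.spec others frames)

end Vorbis.Spec.swap_bytes
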